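-- pv_equiv track=rewrite | github.com/dimostzim/pre-miRBench | premirna_orthologues/get_orthologues.py | find_sequence_by_name
-- ===== SOURCE A (Python) =====
-- def find_sequence_by_name(target_id, fasta_sequences, sequence_type="primary"):
--     candidates = []
--     candidates.append(target_id)
--
--     if sequence_type == "primary":
--         candidates.extend([
--             f"{target_id}_pri",
--             f"{target_id}-pri",
--             f"{target_id}.pri",
--             target_id.replace("-", "_") + "_pri",
--             target_id.lower() + "_pri",
--             target_id.upper() + "_pri"
--         ])
--     elif sequence_type == "precursor":
--         candidates.extend([
--             f"{target_id}_pre",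
--             f"{target_id}-pre",
--             f"{target_id}.pre",
--             target_id.replace("-", "_") + "_pre",
--             target_id.lower() + "_pre",
--             target_id.upper() + "_pre"
--         ])
--
--     candidates = list(dict.fromkeys(candidates))
--
--     matches = []
--     for candidate in candidates:
--         if candidate in fasta_sequences:
--             matches.append((candidate, fasta_sequences[candidate]))
--
--     if len(matches) == 0:
--         return None, None
--     elif len(matches) == 1:
--         return matches[0]
--     else:
--         for candidate in candidates:
--             for seq_id, sequence in matches:
--                 if seq_id == candidate:
--                     return seq_id, sequence
--         return matches[0]
-- ===== SOURCE B (Python) =====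
-- def find_sequence_by_name(target_id, fasta_sequences, sequence_type="primary"):
--     candidates = [target_id]
--     if sequence_type == "primary":
--         candidates += [target_id + "_pri", target_id + "-pri", target_id + ".pri",
--                        target_id.replace("-", "_") + "_pri",
--                        target_id.lower() + "_pri", target_id.upper() + "_pri"]
--     elif sequence_type == "precursor":
--         candidates += [target_id + "_pre", target_id + "-pre", target_id + ".pre",
--                        target_id.replace("-", "_") + "_pre",
--                        target_id.lower() + "_pre", target_id.upper() + "_pre"]
--     for candidate in candidates:
--         if candidate in fasta_sequences:
--             return candidate, fasta_sequences[candidate]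
--     return None, None
-- ===== Notes on version B (the rewrite author's own statement) =====
-- stated objective: simpler
-- what changed: B replaces A's dedup + collect-all-matches pass + length-based branching + nested re-scan over candidates×matches with a single pass over the candidate list that returns on the first key present in the dict; dedup is dropped because the first occurrence already decides the result.
import Mathlib
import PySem

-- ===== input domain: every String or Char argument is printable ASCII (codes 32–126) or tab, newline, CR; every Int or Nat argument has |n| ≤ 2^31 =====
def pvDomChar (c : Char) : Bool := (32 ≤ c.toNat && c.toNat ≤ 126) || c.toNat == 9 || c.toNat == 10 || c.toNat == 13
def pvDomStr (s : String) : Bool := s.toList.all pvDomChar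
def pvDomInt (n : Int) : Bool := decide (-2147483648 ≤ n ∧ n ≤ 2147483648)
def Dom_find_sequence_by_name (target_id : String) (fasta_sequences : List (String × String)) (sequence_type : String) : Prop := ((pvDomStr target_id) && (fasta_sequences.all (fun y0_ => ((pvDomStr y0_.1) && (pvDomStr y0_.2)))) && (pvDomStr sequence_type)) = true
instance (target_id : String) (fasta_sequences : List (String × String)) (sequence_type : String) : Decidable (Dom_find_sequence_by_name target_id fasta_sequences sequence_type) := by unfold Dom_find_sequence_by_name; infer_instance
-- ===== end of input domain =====

-- B replaces A's dedup + collect-all-matches + length branching + nested re-scan with a single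
-- early-return pass over the same candidate list (simpler; same first-match result).


-- ===== PORT A =====
-- the candidate list is built by textually identical Python in A and in B, so both ports share this helper
def pvCandidates (target_id : String) (sequence_type : String) : List String :=
  [target_id] ++
    (if sequence_type = "primary" then
       [target_id ++ "_pri", target_id ++ "-pri", target_id ++ ".pri",
        PySem.Str.replace target_id "-" "_" ++ "_pri",
        PySem.Str.lower target_id ++ "_pri",
        PySem.Str.upper target_id ++ "_pri"]
     else if sequence_type = "precursor" then
       [target_id ++ "_pre", target_id ++ "-pre", target_id ++ ".pre",
        PySem.Str.replace target_id "-" "_" ++ "_pre",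
        PySem.Str.lower target_id ++ "_pre",
        PySem.Str.upper target_id ++ "_pre"]
     else [])

def find_sequence_by_name (target_id : String) (fasta_sequences : List (String × String)) (sequence_type : String) : Option String × Option String :=
  let d : PySem.Dict String String := PySem.Dict.mk fasta_sequences
  let candidates := PySem.List.dedup (pvCandidates target_id sequence_type)
  let found := candidates.foldl (fun acc c =>
      match d.get? c with
      | some v => acc ++ [(c, v)]
      | none => acc) []
  if found.length = 0 then (none, none)
  else if found.length = 1 then
    match found with
    | (a, b) :: _ => (some a, some b)
    | [] => (none, none)   -- unreachable: found.length = 1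
  else
    match candidates.findSome? (fun c => found.find? (fun m => m.1 == c)) with
    | some (a, b) => (some a, some b)
    | none =>
      match found with
      | (a, b) :: _ => (some a, some b)
      | [] => (none, none)  -- unreachable: found.length ≥ 2

-- ===== PORT B =====
-- 'for candidate in candidates: if candidate in fasta_sequences: return …'
def pvFirstHit (d : PySem.Dict String String) : List String → Option String × Option String
  | [] => (none, none)
  | c :: rest =>
    match d.get? c with
    | some v => (some c, some v)
    | none => pvFirstHit d rest

def find_sequence_by_name_alt (target_id : String) (fasta_sequences : List (String × String)) (sequence_type : String) : Option String × Option String :=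
  pvFirstHit (PySem.Dict.mk fasta_sequences) (pvCandidates target_id sequence_type)

-- ===== PRECONDITION & SPEC =====
def Spec_find_sequence_by_name (target_id : String) (fasta_sequences : List (String × String)) (sequence_type : String) (out : Option String × Option String) : Prop := out = find_sequence_by_name_alt target_id fasta_sequences sequence_type
instance (target_id : String) (fasta_sequences : List (String × String)) (sequence_type : String) (out : Option String × Option String) : Decidable (Spec_find_sequence_by_name target_id fasta_sequences sequence_type out) := by unfold Spec_find_sequence_by_name; infer_instance

-- ===== CLAIM (what is proved, stated in full; the proofs are below) =====
def Claim_equal_find_sequence_by_name : Prop := ∀ (target_id : String) (fasta_sequences : List (String × String)) (sequence_type : String), Dom_find_sequence_by_name target_id fasta_sequences sequence_type → Spec_find_sequence_by_name target_id fasta_sequences sequence_type (find_sequence_by_name target_id fasta_sequences sequence_type)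

-- ===== LEMMAS AND PROOFS =====

-- the keyed probe: g c paired with its key
def pvProbe (g : String → Option String) (c : String) : Option (String × String) :=
  (g c).map (fun v => (c, v))

-- A's accumulating loop is filterMap of the probe
theorem pv_foldl_eq_filterMap (g : String → Option String) :
    ∀ (cs : List String) (acc : List (String × String)),
      cs.foldl (fun acc c =>
        match g c with
        | some v => acc ++ [(c, v)]
        | none => acc) acc = acc ++ cs.filterMap (pvProbe g) := by
  intro cs
  induction cs with
  | nil => intro acc; simp
  | cons c rest ih =>
    intro acc
    simp only [List.foldl_cons, List.filterMap_cons, pvProbe]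
    cases h : g c with
    | none => simpa [h] using ih acc
    | some v => simp [pvProbe, ih (acc ++ [(c, v)])]

-- adding one element to a Set preserves first-probe semantics
theorem pv_findSome?_add (g : String → Option String) (acc : List String) (c : String) :
    List.findSome? (pvProbe g) (PySem.Set.add acc c)
      = (List.findSome? (pvProbe g) acc).or (pvProbe g c) := by
  by_cases hmem : PySem.Set.contains acc c = true
  · simp only [PySem.Set.add, hmem, if_pos]
    cases hacc : List.findSome? (pvProbe g) acc with
    | some v => simp
    | none =>
      have : pvProbe g c = none :=
        (List.findSome?_eq_none_iff.mp hacc) c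
          (by simpa [PySem.Set.contains, List.contains_iff_mem] using hmem)
      simp [this]
  · simp only [PySem.Set.add, hmem, if_neg, Bool.false_eq_true, not_false_iff]
    rw [List.findSome?_append]
    simp

-- dedup (dict.fromkeys) does not change the first successful probe
theorem pv_findSome?_dedup (g : String → Option String) (cs : List String) :
    List.findSome? (pvProbe g) (PySem.List.dedup cs) = List.findSome? (pvProbe g) cs := by
  suffices h : ∀ (cs : List String) (acc : List String),
      List.findSome? (pvProbe g) (cs.foldl PySem.Set.add acc)
        = (List.findSome? (pvProbe g) acc).or (List.findSome? (pvProbe g) cs) by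
    simpa [PySem.List.dedup, PySem.Set.ofList, PySem.Set.empty] using h cs []
  intro cs
  induction cs with
  | nil => intro acc; simp
  | cons c rest ih =>
    intro acc
    simp only [List.foldl_cons, List.findSome?_cons]
    rw [ih (PySem.Set.add acc c), pv_findSome?_add]
    cases pvProbe g c <;> cases List.findSome? (pvProbe g) acc <;> simp

-- keys of collected matches really probe to that match
theorem pv_mem_filterMap_probe (g : String → Option String) (cs : List String)
    (m : String × String) (hm : m ∈ cs.filterMap (pvProbe g)) : g m.1 = some m.2 := by
  rcases List.mem_filterMap.mp hm with ⟨x, _, hx⟩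
  simp only [pvProbe] at hx
  cases hgx : g x with
  | none => simp [hgx] at hx
  | some v =>
    simp only [hgx, Option.map_some] at hx
    cases hx
    simpa using hgx

-- A's nested re-scan over candidates × matches returns the head match
theorem pv_rescan_eq_head (g : String → Option String) :
    ∀ (cs : List String) (a b : String) (t : List (String × String)),
      cs.filterMap (pvProbe g) = (a, b) :: t →
      cs.findSome? (fun c => (cs.filterMap (pvProbe g)).find? (fun m => m.1 == c)) = some (a, b) := by
  have key : ∀ (cs : List String) (ms : List (String × String)) (a b : String)
      (t : List (String × String)),
      (∀ m ∈ ms, g m.1 = some m.2) →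
      (a, b) ∈ ms →
      cs.filterMap (pvProbe g) = (a, b) :: t →
      cs.findSome? (fun c => ms.find? (fun m => m.1 == c)) =
        ms.find? (fun m => m.1 == a) := by
    intro cs
    induction cs with
    | nil => intro ms a b t _ _ h; simp at h
    | cons c rest ih =>
      intro ms a b t hms hmem h
      simp only [List.filterMap_cons] at h
      cases hgc : g c with
      | some v =>
        simp only [pvProbe, hgc, Option.map_some] at h
        injection h with h1 h2
        injection h1 with ha hb
        subst ha
        have hsome : (ms.find? (fun m => m.1 == c)).isSome := by
          rw [List.find?_isSome]
          exact ⟨(c, b), hmem, by simp⟩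
        cases hfc : ms.find? (fun m => m.1 == c) with
        | none => rw [hfc] at hsome; simp at hsome
        | some x => simp [hfc]
      | none =>
        simp only [pvProbe, hgc, Option.map_none] at h
        have hfind : ms.find? (fun m => m.1 == c) = none := by
          rw [List.find?_eq_none]
          intro m hm
          have hgm := hms m hm
          simp only [beq_iff_eq]
          intro hc
          rw [hc] at hgm
          rw [hgm] at hgc
          simp at hgc
        simp only [List.findSome?_cons, hfind]
        exact ih ms a b t hms hmem h
  intro cs a b t h
  rw [key cs (cs.filterMap (pvProbe g)) a b t
        (fun m hm => pv_mem_filterMap_probe g cs m hm) (by rw [h]; exact List.mem_cons_self) h, h]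
  simp

-- B's early-return loop in terms of the first successful probe
theorem pv_firstHit_eq (d : PySem.Dict String String) (cs : List String) :
    pvFirstHit d cs =
      match List.findSome? (pvProbe (d.get?)) cs with
      | some (a, b) => (some a, some b)
      | none => (none, none) := by
  induction cs with
  | nil => simp [pvFirstHit]
  | cons c rest ih =>
    simp only [pvFirstHit, List.findSome?_cons]
    cases h : d.get? c with
    | some v => simp [pvProbe, h]
    | none => simp [pvProbe, h, ih]

-- A's whole body, generic in the dict and the candidate list, equals B's loop
theorem pv_main (d : PySem.Dict String String) (cs : List String) :
    (let candidates := PySem.List.dedup cs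
     let found := candidates.foldl (fun acc c =>
         match d.get? c with
         | some v => acc ++ [(c, v)]
         | none => acc) []
     if found.length = 0 then ((none : Option String), (none : Option String))
     else if found.length = 1 then
       match found with
       | (a, b) :: _ => (some a, some b)
       | [] => (none, none)
     else
       match candidates.findSome? (fun c => found.find? (fun m => m.1 == c)) with
       | some (a, b) => (some a, some b)
       | none =>
         match found with
         | (a, b) :: _ => (some a, some b)
         | [] => (none, none))
    = pvFirstHit d cs := by
  simp only []
  set g : String → Option String := d.get? with hg
  rw [pv_firstHit_eq, pv_foldl_eq_filterMap g (PySem.List.dedup cs) []]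
  simp only [List.nil_append]
  have hEq : List.findSome? (pvProbe g) cs
      = (List.filterMap (pvProbe g) (PySem.List.dedup cs)).head? := by
    rw [List.head?_filterMap, pv_findSome?_dedup]
  rw [hEq]
  cases hfm : (PySem.List.dedup cs).filterMap (pvProbe g) with
  | nil => simp
  | cons hd_ tl =>
    obtain ⟨a, b⟩ := hd_
    rcases tl with _ | ⟨m2, tl2⟩
    · simp
    · simp only [List.length_cons]
      rw [if_neg (by simp), if_neg (by omega), ← hfm,
          pv_rescan_eq_head g (PySem.List.dedup cs) a b (m2 :: tl2) hfm, hfm]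
      simp

-- ===== VERDICT (by name: the statement is the Claim_ definition above) =====
theorem find_sequence_by_name_spec : Claim_equal_find_sequence_by_name := by
  intro target_id fasta_sequences sequence_type _
  exact pv_main (PySem.Dict.mk fasta_sequences) (pvCandidates target_id sequence_type)
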